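-- pv_equiv track=rewrite | github.com/gkolluri/chatbot | agents/tag_analysis_agent.py | _get_synonym_suggestions
-- ===== SOURCE A (Python) =====
-- from typing import Dict, Any, List, Optional, Set
--
-- def _get_synonym_suggestions(existing_tags: List[str]) -> List[str]:
--     """
--     Get synonym-based tag suggestions.
--
--     Args:
--         existing_tags: User's current tags
--
--     Returns:
--         List of synonym suggestions
--     """
--     # Simple synonym mapping
--     synonym_map = {
--         'programming': ['coding', 'software development', 'tech'],
--         'music': ['songs', 'melody', 'rhythm'],
--         'cooking': ['food', 'cuisine', 'recipes'],
--         'travel': ['tourism', 'exploration', 'adventure'],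
--         'fitness': ['exercise', 'workout', 'health'],
--         'reading': ['books', 'literature', 'novels'],
--         'photography': ['photos', 'camera', 'images'],
--         'gaming': ['video games', 'esports', 'play'],
--         'art': ['painting', 'drawing', 'creative'],
--         'sports': ['athletics', 'games', 'physical activity']
--     }
--
--     suggestions = []
--     for tag in existing_tags:
--         if tag in synonym_map:
--             synonyms = synonym_map[tag]
--             for synonym in synonyms:
--                 if synonym not in existing_tags and synonym not in suggestions:
--                     suggestions.append(synonym)
--                     if len(suggestions) >= 3:
--                         break
--         if len(suggestions) >= 3:
--             break
--
--     return suggestions[:3]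
-- ===== SOURCE B (Python) =====
-- def _get_synonym_suggestions(existing_tags):
--     synonym_map = {
--         'programming': ['coding', 'software development', 'tech'],
--         'music': ['songs', 'melody', 'rhythm'],
--         'cooking': ['food', 'cuisine', 'recipes'],
--         'travel': ['tourism', 'exploration', 'adventure'],
--         'fitness': ['exercise', 'workout', 'health'],
--         'reading': ['books', 'literature', 'novels'],
--         'photography': ['photos', 'camera', 'images'],
--         'gaming': ['video games', 'esports', 'play'],
--         'art': ['painting', 'drawing', 'creative'],
--         'sports': ['athletics', 'games', 'physical activity']
--     }
--     # phase 1: gather every mapped synonym, in tag order, no early exit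
--     candidates = []
--     for tag in existing_tags:
--         candidates.extend(synonym_map.get(tag, []))
--     # phase 2: drop existing tags, dedup keeping first occurrence
--     result = []
--     for c in candidates:
--         if c not in existing_tags and c not in result:
--             result.append(c)
--     return result[:3]
-- ===== Notes on version B (the rewrite author's own statement) =====
-- stated objective: simpler
-- what changed: Replaced the capped early-exit nested loop with two flat passes: gather all mapped synonyms, then filter/dedup once, then slice the first three.
import Mathlib
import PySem

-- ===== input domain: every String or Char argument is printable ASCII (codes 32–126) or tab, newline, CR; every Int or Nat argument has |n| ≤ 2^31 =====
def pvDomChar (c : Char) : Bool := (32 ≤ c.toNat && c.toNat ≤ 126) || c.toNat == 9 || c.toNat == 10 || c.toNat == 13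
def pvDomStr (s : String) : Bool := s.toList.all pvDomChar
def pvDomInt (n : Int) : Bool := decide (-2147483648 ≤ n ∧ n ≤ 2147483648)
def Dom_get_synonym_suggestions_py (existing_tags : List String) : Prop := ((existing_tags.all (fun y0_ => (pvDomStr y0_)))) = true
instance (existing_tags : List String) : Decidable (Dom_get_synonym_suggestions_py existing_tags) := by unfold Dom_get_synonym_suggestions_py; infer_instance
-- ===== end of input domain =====

-- B replaces A's capped early-exit nested loop by two flat passes (gather all synonyms, then
-- filter/dedup, then slice the first three); objective: simpler decomposition, same cost.

-- the synonym_map literal both Pythons build (same key/value pairs, insertion order)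
def pvSynonymMap : PySem.Dict String (List String) := PySem.Dict.ofList
  [("programming", ["coding", "software development", "tech"]),
   ("music", ["songs", "melody", "rhythm"]),
   ("cooking", ["food", "cuisine", "recipes"]),
   ("travel", ["tourism", "exploration", "adventure"]),
   ("fitness", ["exercise", "workout", "health"]),
   ("reading", ["books", "literature", "novels"]),
   ("photography", ["photos", "camera", "images"]),
   ("gaming", ["video games", "esports", "play"]),
   ("art", ["painting", "drawing", "creative"]),
   ("sports", ["athletics", "games", "physical activity"])]

-- ===== PORT A =====
-- inner 'for synonym in synonyms' loop with its break as soon as len(suggestions) >= 3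
def pvInnerA (existing : List String) : List String → List String → List String
  | sugg, [] => sugg
  | sugg, s :: rest =>
    if !(existing.contains s) && !(sugg.contains s) then
      let sugg' := sugg ++ [s]
      if 3 ≤ sugg'.length then sugg' else pvInnerA existing sugg' rest
    else pvInnerA existing sugg rest

-- outer 'for tag in existing_tags' loop with its break when len(suggestions) >= 3
def pvOuterA (existing : List String) : List String → List String → List String
  | [], sugg => sugg
  | t :: rest, sugg =>
    -- 'if tag in synonym_map: synonyms = synonym_map[tag]' (lookup under a proven key)
    let sugg' := if pvSynonymMap.contains t then pvInnerA existing sugg (pvSynonymMap.getD t []) else sugg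
    if 3 ≤ sugg'.length then sugg' else pvOuterA existing rest sugg'

def get_synonym_suggestions_py (existing_tags : List String) : List String :=
  PySem.List.slice (pvOuterA existing_tags existing_tags []) none (some 3)

-- ===== PORT B =====
-- phase 2 of Source B: one pass dropping existing tags and duplicates (first occurrence kept)
def pvFilt (existing : List String) : List String → List String → List String
  | acc, [] => acc
  | acc, c :: rest =>
    if !(existing.contains c) && !(acc.contains c) then pvFilt existing (acc ++ [c]) rest
    else pvFilt existing acc rest

def get_synonym_suggestions_py_alt (existing_tags : List String) : List String :=
  -- phase 1 of Source B: candidates.extend(synonym_map.get(tag, [])) for each tag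
  let candidates := existing_tags.foldl (fun cs t => cs ++ pvSynonymMap.getD t []) []
  PySem.List.slice (pvFilt existing_tags [] candidates) none (some 3)

-- ===== PRECONDITION & SPEC =====
def Spec_get_synonym_suggestions_py (existing_tags : List String) (out : List String) : Prop := out = get_synonym_suggestions_py_alt existing_tags
instance (existing_tags : List String) (out : List String) : Decidable (Spec_get_synonym_suggestions_py existing_tags out) := by unfold Spec_get_synonym_suggestions_py; infer_instance

-- ===== CLAIM (what is proved, stated in full; the proofs are below) =====
def Claim_equal_get_synonym_suggestions_py : Prop := ∀ (existing_tags : List String), Dom_get_synonym_suggestions_py existing_tags → Spec_get_synonym_suggestions_py existing_tags (get_synonym_suggestions_py existing_tags)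

-- ===== LEMMAS AND PROOFS =====

-- filtering a concatenation = filter the first chunk, then the second
theorem pvFilt_append (e : List String) (xs ys acc : List String) :
    pvFilt e acc (xs ++ ys) = pvFilt e (pvFilt e acc xs) ys := by
  induction xs generalizing acc with
  | nil => simp [pvFilt]
  | cons c rest ih =>
    simp only [List.cons_append, pvFilt]
    split_ifs <;> exact ih _

-- pvFilt only appends at the end: once the accumulator has ≥ 3 elements its take 3 is fixed
theorem pvFilt_take3 (e : List String) (cs acc : List String) (h : 3 ≤ acc.length) :
    (pvFilt e acc cs).take 3 = acc.take 3 := by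
  induction cs generalizing acc with
  | nil => simp [pvFilt]
  | cons c rest ih =>
    simp only [pvFilt]
    split_ifs with hc
    · rw [ih _ (by simp; omega), List.take_append_of_le_length h]
    · exact ih _ h

-- the early-exit inner loop computes the first three of the full filter pass
theorem pvInnerA_eq (e : List String) (syns acc : List String) (h : acc.length < 3) :
    pvInnerA e acc syns = (pvFilt e acc syns).take 3 := by
  induction syns generalizing acc with
  | nil => simp [pvInnerA, pvFilt, List.take_of_length_le (by omega : acc.length ≤ 3)]
  | cons s rest ih =>
    simp only [pvInnerA, pvFilt]
    split_ifs with hc hlen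
    · rw [pvFilt_take3 e rest _ hlen, List.take_of_length_le (by simp; omega)]
    · exact ih _ (by simp at hlen ⊢; omega)
    · exact ih _ h

-- the early-exit outer loop computes the first three of filtering all gathered candidates
theorem pvOuterA_eq (e : List String) (tags acc : List String) (h : acc.length < 3) :
    pvOuterA e tags acc =
      (pvFilt e acc (tags.flatMap (fun t => pvSynonymMap.getD t []))).take 3 := by
  induction tags generalizing acc with
  | nil => simp [pvOuterA, pvFilt, List.take_of_length_le (by omega : acc.length ≤ 3)]
  | cons t rest ih =>
    simp only [pvOuterA, List.flatMap_cons, pvFilt_append]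
    by_cases hct : pvSynonymMap.contains t
    · simp only [hct, if_true, pvInnerA_eq e _ acc h]
      by_cases h3 : 3 ≤ ((pvFilt e acc (pvSynonymMap.getD t [])).take 3).length
      · have h3' : 3 ≤ (pvFilt e acc (pvSynonymMap.getD t [])).length := by
          simp at h3; omega
        rw [if_pos h3,
          pvFilt_take3 e (rest.flatMap fun t => pvSynonymMap.getD t []) _ h3']
      · have hlt : (pvFilt e acc (pvSynonymMap.getD t [])).length < 3 := by
          simp at h3; omega
        rw [if_neg h3, List.take_of_length_le (by omega), ih _ hlt]
    · have hcf : pvSynonymMap.contains t = false := by simpa using hct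
      have hg : pvSynonymMap.getD t [] = [] :=
        PySem.Dict.getD_of_not_contains _ _ hcf
      have hsame :
          (if pvSynonymMap.contains t then pvInnerA e acc (pvSynonymMap.getD t []) else acc)
            = acc := by
        rw [hg]; split_ifs
        rfl
      rw [hsame, hg, if_neg (by omega : ¬ 3 ≤ acc.length)]
      simp only [pvFilt]
      exact ih _ h

-- Source B's gather loop builds the flatMap of the synonym lists
theorem pvCandidates_eq (tags : List String) :
    tags.foldl (fun cs t => cs ++ pvSynonymMap.getD t []) [] =
      tags.flatMap (fun t => pvSynonymMap.getD t []) := by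
  show List.foldl (fun acc x => acc ++ (fun t => pvSynonymMap.getD t []) x) [] tags = _
  rw [PySem.List.foldl_append_eq_flatMap, List.nil_append]

-- ===== VERDICT (by name: the statement is the Claim_ definition above) =====
theorem get_synonym_suggestions_py_spec : Claim_equal_get_synonym_suggestions_py := by
  intro e _
  unfold Spec_get_synonym_suggestions_py get_synonym_suggestions_py get_synonym_suggestions_py_alt
  simp only [pvCandidates_eq]
  rw [pvOuterA_eq e e [] (by simp)]
  rw [PySem.List.slice_to _ (by norm_num), PySem.List.slice_to _ (by norm_num)]
  simp [List.take_take]
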